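-- pv_equiv track=rewrite | github.com/https123456789/games.unblocked-stuff.repl.co | mimeTypes.py | getMimeTypeForExtension
-- ===== SOURCE A (Python) =====
-- types = {
-- 	"text/cache-manifest": [
-- 		".appcache"
-- 	],
-- 	"text/plain": [
-- 		".txt"
-- 	],
-- 	"application/json": [
-- 		".json"
-- 	],
-- 	"text/javascript": [
-- 		".js",
-- 		".mjs"
-- 	],
-- 	"text/html": [
-- 		".html",
-- 		".htm"
-- 	],
-- 	"text/css": [
-- 		".css"
-- 	],
-- 	"application/x-httpd-php": [
-- 		".php"
-- 	],
-- 	"image/jpeg": [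
-- 		".jpg",
-- 		".jpeg"
-- 	],
-- 	"image/png": [
-- 		".png"
-- 	],
-- 	"audio/mpeg": [
-- 		".mp3",
-- 		".mpeg"
-- 	],
-- 	"video/mp4": [
-- 		".mp4"
-- 	],
-- 	"image/svg+xml": [
-- 		".svg"
-- 	],
-- 	"image/vnd.microsoft.icon": [
-- 		".ico"
-- 	],
-- 	"application/octet-stream": [
-- 		".bin"
-- 	],
-- 	"image/gif": [
-- 		".gif"
-- 	],
-- 	"application/java-archive": [
-- 		".jar"
-- 	],
-- 	"application/ogg": [
-- 		".ogg"
-- 	],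
-- 	"video/ogg": [
-- 		".ogv"
-- 	]
-- }
--
-- def getMimeTypeForExtension(filePath):
-- 	fileName = filePath.split("/")[-1]
-- 	if "." in fileName:
-- 		fileExtension = "." + fileName.split(".")[-1]
-- 	else:
-- 		return "application/octet-stream"
-- 	for ct in types.keys():
-- 		if fileExtension in types[ct]:
-- 			return ct
-- 	return "application/octet-stream"
-- ===== SOURCE B (Python) =====
-- types = {
-- 	"text/cache-manifest": [".appcache"],
-- 	"text/plain": [".txt"],
-- 	"application/json": [".json"],
-- 	"text/javascript": [".js", ".mjs"],
-- 	"text/html": [".html", ".htm"],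
-- 	"text/css": [".css"],
-- 	"application/x-httpd-php": [".php"],
-- 	"image/jpeg": [".jpg", ".jpeg"],
-- 	"image/png": [".png"],
-- 	"audio/mpeg": [".mp3", ".mpeg"],
-- 	"video/mp4": [".mp4"],
-- 	"image/svg+xml": [".svg"],
-- 	"image/vnd.microsoft.icon": [".ico"],
-- 	"application/octet-stream": [".bin"],
-- 	"image/gif": [".gif"],
-- 	"application/java-archive": [".jar"],
-- 	"application/ogg": [".ogg"],
-- 	"video/ogg": [".ogv"]
-- }
--
-- # Reverse index built once: extension -> mime type (no extension occurs twice,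
-- # so the lookup is unambiguous).
-- EXT_TO_MIME = {ext: ct for ct, exts in types.items() for ext in exts}
--
-- def getMimeTypeForExtension(filePath):
-- 	# One forward pass over the path, no splitting: track the extension of the
-- 	# component read so far ('/' discards it, '.' restarts it), then one lookup.
-- 	ext = None
-- 	for ch in filePath:
-- 		if ch == "/":
-- 			ext = None
-- 		elif ch == ".":
-- 			ext = "."
-- 		elif ext is not None:
-- 			ext = ext + ch
-- 	if ext is None:
-- 		return "application/octet-stream"
-- 	return EXT_TO_MIME.get(ext, "application/octet-stream")
-- ===== Notes on version B (the rewrite author's own statement) =====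
-- stated objective: alternative
-- what changed: Replaced A's parsing by two split-into-lists passes plus a per-call linear scan of the mime table by a single forward state-machine pass over the path (it tracks the current extension candidate, discarded on '/', restarted on '.') followed by one lookup in a reverse extension-to-mime dictionary built once; same O(n) cost, no intermediate lists.
import Mathlib
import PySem

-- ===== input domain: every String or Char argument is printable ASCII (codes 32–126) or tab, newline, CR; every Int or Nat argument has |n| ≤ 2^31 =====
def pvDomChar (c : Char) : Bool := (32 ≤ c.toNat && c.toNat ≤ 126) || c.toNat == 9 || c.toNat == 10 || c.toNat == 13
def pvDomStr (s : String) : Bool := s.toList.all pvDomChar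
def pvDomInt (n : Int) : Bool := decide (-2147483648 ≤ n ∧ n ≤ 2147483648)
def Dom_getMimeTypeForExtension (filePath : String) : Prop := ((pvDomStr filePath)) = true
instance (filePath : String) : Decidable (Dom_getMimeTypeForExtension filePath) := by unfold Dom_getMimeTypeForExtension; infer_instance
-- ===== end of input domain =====

-- B replaces A's split-based parsing and per-call table scan by one forward
-- state-machine pass over the path plus a reverse extension→mime dictionary built once.


-- ===== PORT A =====
-- the module-level `types` dict (insertion order)
def typesTable : List (String × List String) := [
  ("text/cache-manifest", [".appcache"]),
  ("text/plain", [".txt"]),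
  ("application/json", [".json"]),
  ("text/javascript", [".js", ".mjs"]),
  ("text/html", [".html", ".htm"]),
  ("text/css", [".css"]),
  ("application/x-httpd-php", [".php"]),
  ("image/jpeg", [".jpg", ".jpeg"]),
  ("image/png", [".png"]),
  ("audio/mpeg", [".mp3", ".mpeg"]),
  ("video/mp4", [".mp4"]),
  ("image/svg+xml", [".svg"]),
  ("image/vnd.microsoft.icon", [".ico"]),
  ("application/octet-stream", [".bin"]),
  ("image/gif", [".gif"]),
  ("application/java-archive", [".jar"]),
  ("application/ogg", [".ogg"]),
  ("video/ogg", [".ogv"])]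

-- the `for ct in types.keys(): if fileExtension in types[ct]: return ct` loop
def scanTypes : List (String × List String) → String → String
  | [], _ => "application/octet-stream"
  | (ct, exts) :: rest, ext => if exts.contains ext then ct else scanTypes rest ext

def getMimeTypeForExtension (filePath : String) : String :=
  -- split("/") with nonempty separator never raises and returns a nonempty list,
  -- so the two .getD defaults are unreachable (same for the split(".") below)
  let fileName := (PySem.List.pyGet? ((PySem.Str.split? filePath "/").getD []) (-1)).getD ""
  if PySem.Str.isIn "." fileName then
    let fileExtension := "." ++ (PySem.List.pyGet? ((PySem.Str.split? fileName ".").getD []) (-1)).getD ""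
    scanTypes typesTable fileExtension
  else "application/octet-stream"

-- ===== PORT B =====
-- EXT_TO_MIME = {ext: ct for ct, exts in types.items() for ext in exts}
def extToMime : PySem.Dict String String :=
  PySem.Dict.ofList (typesTable.flatMap (fun p => p.2.map (fun x => (x, p.1))))

-- body of B's single `for ch in filePath` loop: '/' discards the candidate, '.' restarts it
def stepExt (ext : Option (List Char)) (ch : Char) : Option (List Char) :=
  if ch = '/' then none
  else if ch = '.' then some ['.']
  else
    match ext with
    | none => none
    | some e => some (e ++ [ch])

def getMimeTypeForExtension_alt (filePath : String) : String :=
  match filePath.toList.foldl stepExt none with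
  | none => "application/octet-stream"
  | some e => PySem.Dict.getD extToMime (String.ofList e) "application/octet-stream"

-- ===== PRECONDITION & SPEC =====
def Spec_getMimeTypeForExtension (filePath : String) (out : String) : Prop := out = getMimeTypeForExtension_alt filePath
instance (filePath : String) (out : String) : Decidable (Spec_getMimeTypeForExtension filePath out) := by unfold Spec_getMimeTypeForExtension; infer_instance

-- ===== CLAIM (what is proved, stated in full; the proofs are below) =====
def Claim_equal_getMimeTypeForExtension : Prop := ∀ (filePath : String), Dom_getMimeTypeForExtension filePath → Spec_getMimeTypeForExtension filePath (getMimeTypeForExtension filePath)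

-- ===== LEMMAS AND PROOFS =====

-- the segments splitOn produces for a one-char separator, accumulator-style
def segs (c : Char) : List Char → List Char → List (List Char)
  | [], cur => [cur.reverse]
  | a :: rest, cur => if a = c then cur.reverse :: segs c rest [] else segs c rest (a :: cur)

-- the last segment alone
def lastSeg (c : Char) : List Char → List Char → List Char
  | [], cur => cur.reverse
  | a :: rest, cur => if a = c then lastSeg c rest [] else lastSeg c rest (a :: cur)

lemma go_spec (c : Char) : ∀ (fuel : Nat) (l cur : List Char) (acc : List (List Char)),
    l.length < fuel →
    PySem.Chars.splitOn.go [c] fuel l cur acc = acc.reverse ++ segs c l cur := by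
  intro fuel
  induction fuel with
  | zero => intro l cur acc h; omega
  | succ n ih =>
    intro l cur acc h
    cases l with
    | nil => simp [PySem.Chars.splitOn.go, segs]
    | cons a rest =>
      by_cases hac : a = c
      · subst hac
        simp [PySem.Chars.splitOn.go, List.isPrefixOf, segs,
              ih rest [] (cur.reverse :: acc) (by simpa using Nat.lt_of_succ_lt_succ h)]
      · simp [PySem.Chars.splitOn.go, List.isPrefixOf, Ne.symm hac, hac, segs,
              ih rest (a :: cur) acc (by simpa using Nat.lt_of_succ_lt_succ h)]

lemma splitOn_single (c : Char) (l : List Char) :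
    PySem.Chars.splitOn l [c] = segs c l [] := by
  simpa using go_spec c (l.length + 1) l [] [] (by omega)

lemma getLast?_segs (c : Char) : ∀ (l cur : List Char),
    (segs c l cur).getLast? = some (lastSeg c l cur) := by
  intro l
  induction l with
  | nil => intro cur; simp [segs, lastSeg]
  | cons a rest ih =>
    intro cur
    by_cases hac : a = c
    · subst hac
      have h := ih ([] : List Char)
      cases hs : segs a rest [] with
      | nil => rw [hs] at h; simp at h
      | cons s ss =>
        rw [hs] at h
        simp [segs, lastSeg, hs, h]
    · simp [segs, lastSeg, hac, ih]

lemma tw_append (c : Char) : ∀ (r : List Char) (a : Char),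
    (r ++ [a]).takeWhile (· ≠ c) = if c ∈ r then r.takeWhile (· ≠ c) else if a = c then r else r ++ [a] := by
  intro r
  induction r with
  | nil => intro a; by_cases h : a = c <;> simp [List.takeWhile, h]
  | cons b r' ih =>
    simp only [ne_eq, decide_not] at ih
    intro a
    by_cases hb : b = c
    · subst hb; simp [List.takeWhile]
    · by_cases hr : c ∈ r' <;> by_cases ha : a = c <;>
        simp [hb, hr, ha, ih, Ne.symm hb]

-- closed form of lastSeg: the part after the last occurrence of c
lemma lastSeg_closed (c : Char) : ∀ (m acc : List Char),
    lastSeg c m acc = if c ∈ m then (m.reverse.takeWhile (· ≠ c)).reverse else acc.reverse ++ m := by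
  intro m
  induction m with
  | nil => intro acc; simp [lastSeg]
  | cons a rest ih =>
    intro acc
    by_cases hac : a = c
    · subst hac
      simp only [lastSeg, ih, List.reverse_cons, tw_append]
      by_cases hm : a ∈ rest
      · simp [hm, List.mem_reverse]
      · simp [hm, List.mem_reverse]
    · simp only [lastSeg, if_neg hac, ih, List.reverse_cons, tw_append]
      by_cases hm : c ∈ rest
      · simp [hm, List.mem_reverse, Ne.symm hac]
      · simp [hm, Ne.symm hac]

lemma lastSeg_nil_rev (c : Char) (cur : List Char) (h : c ∈ cur) :
    lastSeg c cur.reverse [] = (cur.takeWhile (· ≠ c)).reverse := by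
  rw [lastSeg_closed]
  simp [List.mem_reverse, h]

-- B's loop state after reading a component whose reversed prefix is cur
def dotState (cur : List Char) : Option (List Char) :=
  if '.' ∈ cur then some ('.' :: (cur.takeWhile (· ≠ '.')).reverse) else none

-- B's whole loop, characterised through lastSeg
lemma foldl_stepExt : ∀ (l cur : List Char),
    List.foldl stepExt (dotState cur) l =
      (if '.' ∈ lastSeg '/' l cur then some ('.' :: lastSeg '.' (lastSeg '/' l cur) []) else none) := by
  intro l
  induction l with
  | nil =>
    intro cur
    simp only [List.foldl_nil, lastSeg, dotState]
    by_cases h : '.' ∈ cur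
    · simp [List.mem_reverse, h, lastSeg_nil_rev '.' cur h]
    · simp [List.mem_reverse, h]
  | cons a rest ih =>
    intro cur
    by_cases h1 : a = '/'
    · subst h1
      have : stepExt (dotState cur) '/' = dotState [] := by simp [stepExt, dotState]
      simp [List.foldl_cons, this, ih, lastSeg]
    · by_cases h2 : a = '.'
      · subst h2
        have : stepExt (dotState cur) '.' = dotState ('.' :: cur) := by
          simp [stepExt, dotState]
        simp [List.foldl_cons, this, ih, lastSeg, h1]
      · have : stepExt (dotState cur) a = dotState (a :: cur) := by
          by_cases hd : '.' ∈ cur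
          · simp [stepExt, dotState, h1, h2, hd, Ne.symm h2]
          · simp [stepExt, dotState, h1, h2, hd, Ne.symm h2]
        simp [List.foldl_cons, this, ih, lastSeg, h1]

-- A's `xs.split(sep)[-1]` pipeline, for a one-char separator
lemma split_last (s : String) (sep : String) (c : Char) (hsep : sep.toList = [c]) :
    ((PySem.List.pyGet? ((PySem.Str.split? s sep).getD []) (-1)).getD "") =
      String.ofList (lastSeg c s.toList []) := by
  simp [PySem.Str.split?, PySem.Chars.split?, hsep, splitOn_single,
        PySem.List.pyGet?_neg_one, List.getLast?_map, getLast?_segs]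

-- `sub in t` for a one-char sub is membership
lemma isIn_single (t : String) (c : Char) (sub : String) (hsub : sub.toList = [c]) :
    PySem.Str.isIn sub t = true ↔ c ∈ t.toList := by
  rw [PySem.Str.isIn, hsub, PySem.Chars.isIn_iff_infix, List.singleton_infix_iff]

-- looking up e among the pairs produced from one table row
lemma find_flat_row (exts : List String) (ct e : String) :
    List.find? ((fun p => p.1 == e) ∘ fun x => (x, ct)) exts =
      if e ∈ exts then some e else none := by
  induction exts with
  | nil => simp
  | cons x t ih =>
    by_cases hx : x = e
    · subst hx; simp
    · simp [Function.comp, hx, ih, Ne.symm hx]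

-- A's first-match scan equals lookup in the flattened table
lemma scan_eq_flat (t : List (String × List String)) (e : String) :
    scanTypes t e =
      PySem.Dict.getD (PySem.Dict.mk (t.flatMap (fun p => p.2.map (fun x => (x, p.1))))) e
        "application/octet-stream" := by
  induction t with
  | nil => simp [scanTypes, PySem.Dict.getD, PySem.Dict.get?]
  | cons hd rest ih =>
    obtain ⟨ct, exts⟩ := hd
    by_cases h : e ∈ exts
    · simp [scanTypes, PySem.Dict.getD, PySem.Dict.get?, List.find?_append, find_flat_row, h]
    · simp only [PySem.Dict.getD, PySem.Dict.get?] at ih ⊢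
      simp [scanTypes, List.find?_append, find_flat_row, h, ih]

-- ===== VERDICT (by name: the statement is the Claim_ definition above) =====
theorem getMimeTypeForExtension_spec : Claim_equal_getMimeTypeForExtension := by
  intro filePath _
  have hext : extToMime =
      PySem.Dict.mk (typesTable.flatMap (fun p => p.2.map (fun x => (x, p.1)))) := by decide
  unfold Spec_getMimeTypeForExtension getMimeTypeForExtension getMimeTypeForExtension_alt
  have hnone : (none : Option (List Char)) = dotState [] := by simp [dotState]
  rw [hnone, foldl_stepExt filePath.toList []]
  rw [split_last filePath "/" '/' (by decide)]
  set fn := lastSeg '/' filePath.toList [] with hfn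
  by_cases hdot : '.' ∈ fn
  · rw [if_pos ((isIn_single _ '.' "." (by decide)).mpr (by simpa using hdot)),
        if_pos hdot]
    rw [split_last _ "." '.' (by decide)]
    have hkey : ("." ++ String.ofList (lastSeg '.' (String.ofList fn).toList [])) =
        String.ofList ('.' :: lastSeg '.' fn []) := by
      apply String.toList_inj.mp
      simp [String.toList_append]
    rw [hkey, scan_eq_flat, hext]
  · rw [if_neg (fun hIn => hdot (by
        simpa using (isIn_single (String.ofList fn) '.' "." (by decide)).mp hIn)),
      if_neg hdot]
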